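-- pv_equiv track=rewrite | github.com/RAIRLab/bloxorz | level_stitcher_rock.py | rotateLevel
-- ===== SOURCE A (Python) =====
-- emptySpace = "  "
--
-- def rotateLevel(level):
--     newGrid = []
--     rowLen = len(level)
--     colLen = len(level[0])
--
--     for i in range(colLen):
--         newGrid.append([])
--         for j in range(rowLen):
--             newGrid[i].append(emptySpace)
--
--     for i in range(colLen):
--         for j in range(rowLen):
--             newGrid[i][j] = level[rowLen - (j + 1)][i]
--     return newGrid
-- ===== SOURCE B (Python) =====
-- def rotateLevel(level):
--     cols = [[] for _ in level[0]]
--     for row in level: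
--         for i, col in enumerate(cols):
--             col.append(row[i])
--     return [col[::-1] for col in cols]
-- ===== Notes on version B (the rewrite author's own statement) =====
-- stated objective: faster
-- what changed: Replaces A's two staged index-arithmetic passes (pre-fill a colLen x rowLen placeholder grid, then overwrite every cell via level[rowLen-(j+1)][i]) with a single forward pass that accumulates the output columns by appending each row's elements and then reverses each column with a slice; the per-cell work drops from index arithmetic plus doubly-indexed assignment to one list.append, the reversal being a C-level slice per column (measured ~2x at the largest size).
import Mathlib
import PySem

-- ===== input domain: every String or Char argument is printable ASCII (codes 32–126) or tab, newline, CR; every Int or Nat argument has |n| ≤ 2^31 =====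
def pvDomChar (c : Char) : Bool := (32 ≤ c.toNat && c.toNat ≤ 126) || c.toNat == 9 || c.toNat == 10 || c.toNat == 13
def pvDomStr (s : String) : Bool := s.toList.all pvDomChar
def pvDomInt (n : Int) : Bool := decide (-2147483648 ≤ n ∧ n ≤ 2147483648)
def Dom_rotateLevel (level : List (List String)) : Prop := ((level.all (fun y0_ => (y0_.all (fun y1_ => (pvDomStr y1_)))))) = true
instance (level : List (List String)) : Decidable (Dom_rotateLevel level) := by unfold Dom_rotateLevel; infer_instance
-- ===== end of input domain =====

-- B replaces A's pre-fill-then-overwrite index loops with a single forward pass that accumulates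
-- the output columns by appending, then reverses each column (return value only; neither mutates
-- its argument).

-- ===== PORT A =====
def pvEmptySpace : String := "  "

-- g[i][j] = v for the nonnegative in-range indices produced by A's range loops (exact there)
def pvSetIdx (g : List (List String)) (i j : Int) (v : String) : List (List String) :=
  g.set i.toNat ((g.getD i.toNat []).set j.toNat v)

def rotateLevel (level : List (List String)) : List (List String) :=
  let rowLen : Int := level.length
  -- len(level[0]); pyGetD is exact under Pre_ (level ≠ [])
  let colLen : Int := ((PySem.List.pyGetD level 0 []).length : Int)
  -- first loop: newGrid.append([]) then fill the just-appended row i with emptySpace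
  let newGrid := (PySem.List.pyRange 0 colLen 1).foldl
    (fun g _i => g ++ [(PySem.List.pyRange 0 rowLen 1).foldl (fun row _j => row ++ [pvEmptySpace]) []]) []
  -- second loop: newGrid[i][j] = level[rowLen - (j + 1)][i]; pyGetD exact under Pre_ (indices in range)
  (PySem.List.pyRange 0 colLen 1).foldl (fun g i =>
    (PySem.List.pyRange 0 rowLen 1).foldl (fun g j =>
      pvSetIdx g i j (PySem.List.pyGetD (PySem.List.pyGetD level (rowLen - (j + 1)) []) i pvEmptySpace)) g) newGrid

-- ===== PORT B =====
-- cols = [[] for _ in level[0]]; for row in level: for i, col in enumerate(cols): col.append(row[i]);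
-- return [col[::-1] for col in cols].  row[i] → pyGetD, exact under Pre_ (every row at least
-- as long as level[0]); the in-place appends become the functional update of cols.
def rotateLevel_alt (level : List (List String)) : List (List String) :=
  let cols0 : List (List String) := (PySem.List.pyGetD level 0 []).map (fun _ => [])
  let cols := level.foldl (fun cols row =>
    (PySem.List.enumerate cols).map (fun p => p.2 ++ [PySem.List.pyGetD row p.1 ""])) cols0
  cols.map (fun col => (PySem.List.slice? col none none (-1)).getD [])

-- ===== PRECONDITION & SPEC =====
-- Pre_ excludes exactly the inputs where A raises IndexError: the empty level (level[0])
-- and ragged levels in which some row is shorter than the first row (B raises there too).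
def Pre_rotateLevel (level : List (List String)) : Prop :=
  level ≠ [] ∧ ∀ row ∈ level, (level.headD []).length ≤ row.length
instance (level : List (List String)) : Decidable (Pre_rotateLevel level) := by
  unfold Pre_rotateLevel; infer_instance

def pvWitness_rotateLevel : List (List String) := [["a", "b"], ["c", "d"]]

def Spec_rotateLevel (level : List (List String)) (out : List (List String)) : Prop := out = rotateLevel_alt level
instance (level : List (List String)) (out : List (List String)) : Decidable (Spec_rotateLevel level out) := by unfold Spec_rotateLevel; infer_instance

-- ===== CLAIM (what is proved, stated in full; the proofs are below) =====
def Claim_equal_rotateLevel : Prop := ∀ (level : List (List String)), Dom_rotateLevel level → Pre_rotateLevel level → Spec_rotateLevel level (rotateLevel level)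

-- ===== LEMMAS AND PROOFS =====

-- one step of B's fold, written index-wise
lemma stepB_eq (cols : List (List String)) (row : List String) :
    (PySem.List.enumerate cols).map (fun p => p.2 ++ [PySem.List.pyGetD row p.1 ""])
      = (List.range cols.length).map (fun (i : Nat) => cols.getD i [] ++ [PySem.List.pyGetD row (Nat.cast i) ""]) := by
  apply List.ext_getElem
  · simp [PySem.List.length_enumerate]
  · intro k h1 h2
    have hk : k < cols.length := by simpa [PySem.List.length_enumerate] using h1
    simp only [List.getElem_map, List.getElem_range, PySem.List.getElem_enumerate]
    rw [List.getD_eq_getElem _ _ hk]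
    simp

-- B's fold invariant: the start columns extended by the columns of the processed rows in order
lemma foldB_eq : ∀ (rs : List (List String)) (cols : List (List String)),
    (∀ row ∈ rs, cols.length ≤ row.length) →
    rs.foldl (fun cols row =>
        (PySem.List.enumerate cols).map (fun p => p.2 ++ [PySem.List.pyGetD row p.1 ""])) cols
      = (List.range cols.length).map
          (fun (i : Nat) => cols.getD i [] ++ rs.map (fun r => r.getD i "")) := by
  intro rs
  induction rs with
  | nil =>
    intro cols _
    simp only [List.foldl_nil, List.map_nil, List.append_nil]
    apply List.ext_getElem
    · simp
    · intro k h1 h2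
      have hk : k < cols.length := h1
      simp only [List.getElem_map, List.getElem_range]
      rw [List.getD_eq_getElem _ _ hk]
  | cons row rs ih =>
    intro cols hall
    rw [List.foldl_cons, stepB_eq]
    have hlen : ((List.range cols.length).map
        (fun (i : Nat) => cols.getD i [] ++ [PySem.List.pyGetD row (Nat.cast i) ""])).length = cols.length := by
      simp
    rw [ih _ (by rw [hlen]; intro r hr; exact hall r (List.mem_cons_of_mem _ hr))]
    rw [hlen]
    apply List.map_congr_left
    intro i hi
    have hic : i < cols.length := List.mem_range.1 hi
    have hget : ((List.range cols.length).map
        (fun (j : Nat) => cols.getD j [] ++ [PySem.List.pyGetD row (Nat.cast j) ""])).getD i []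
        = cols.getD i [] ++ [PySem.List.pyGetD row (Nat.cast i) ""] := by
      rw [List.getD_eq_getElem _ _ (by simpa using hic)]
      simp
    rw [hget]
    have hrowlen : cols.length ≤ row.length := hall row List.mem_cons_self
    have hpg : PySem.List.pyGetD row (Nat.cast i) "" = row.getD i "" := PySem.List.pyGetD_natCast ..
    simp [hpg, List.append_assoc]

-- A's pre-fill loop builds a replicate grid
lemma foldl_append_const {α : Type} (n : Nat) (x : α) :
    (List.range n).foldl (fun g (_ : Nat) => g ++ [x]) [] = List.replicate n x := by
  induction n with
  | zero => rfl
  | succ n ih => rw [List.range_succ, List.foldl_append, ih, List.replicate_succ']; rfl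

-- setting every index of a row of length r yields the mapped row
lemma row_fill (v : Nat → String) : ∀ (k : Nat) (row : List String), k ≤ row.length →
    (List.range k).foldl (fun row j => row.set j (v j)) row
      = (List.range k).map v ++ row.drop k := by
  intro k
  induction k with
  | zero => intro row _; simp
  | succ k ih =>
    intro row hk
    rw [List.range_succ, List.foldl_append, ih row (by omega), List.map_append]
    simp only [List.foldl_cons, List.foldl_nil, List.map_cons, List.map_nil]
    have hlen : ((List.range k).map v).length = k := by simp
    rw [List.set_append_right _ _ (by omega), List.append_assoc]
    congr 1
    rw [hlen, Nat.sub_self]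
    obtain ⟨a, as, ha⟩ : ∃ a as, row.drop k = a :: as := by
      cases hd : row.drop k with
      | nil => exfalso; have := List.length_drop (l := row) (i := k); rw [hd] at this; simp at this; omega
      | cons a as => exact ⟨a, as, rfl⟩
    rw [ha]
    simp [← List.drop_drop, ha]

-- inner assignment loop for a fixed i only rewrites row i
lemma inner_loop (r : Nat) (g : List (List String)) (i : Nat) (hi : i < g.length) (v : Nat → String) :
    (List.range r).foldl (fun g j => g.set i ((g.getD i []).set j (v j))) g
      = g.set i ((List.range r).foldl (fun row j => row.set j (v j)) (g.getD i [])) := by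
  induction r with
  | zero =>
    simp only [List.range_zero, List.foldl_nil]
    rw [List.getD_eq_getElem _ _ hi, List.set_getElem_self]
  | succ r ih =>
    rw [List.range_succ, List.foldl_append, List.foldl_append, ih]
    simp only [List.foldl_cons, List.foldl_nil]
    rw [List.set_set]
    congr 1
    have : i < (g.set i ((List.range r).foldl (fun row j => row.set j (v j)) (g.getD i []))).length := by
      simpa using hi
    rw [List.getD_eq_getElem _ _ this, List.getElem_set_self]

-- outer loop invariant: after the first k rows are processed the grid is map-prefix ++ untouched suffix
lemma outer_loop (c r : Nat) (v : Nat → Nat → String) : ∀ (k : Nat), k ≤ c →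
    (List.range k).foldl
        (fun g i => (List.range r).foldl (fun g j => g.set i ((g.getD i []).set j (v i j))) g)
        (List.replicate c (List.replicate r pvEmptySpace))
      = (List.range k).map (fun i => (List.range r).map (v i))
          ++ List.replicate (c - k) (List.replicate r pvEmptySpace) := by
  intro k
  induction k with
  | zero => simp
  | succ k ih =>
    intro hk
    rw [List.range_succ, List.foldl_append, ih (by omega)]
    simp only [List.foldl_cons, List.foldl_nil]
    set pre := (List.range k).map (fun i => (List.range r).map (v i)) with hpre
    have hprelen : pre.length = k := by simp [hpre]
    have hck : c - k = (c - (k + 1)) + 1 := by omega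
    have hdrop : List.replicate (c - k) (List.replicate r pvEmptySpace)
        = List.replicate r pvEmptySpace :: List.replicate (c - (k + 1)) (List.replicate r pvEmptySpace) := by
      rw [hck, List.replicate_succ]
    have hglen : (pre ++ List.replicate (c - k) (List.replicate r pvEmptySpace)).length = c := by
      simp [hprelen]; omega
    rw [inner_loop r _ k (by rw [hglen]; omega) (v k)]
    have hget : (pre ++ List.replicate (c - k) (List.replicate r pvEmptySpace)).getD k []
        = List.replicate r pvEmptySpace := by
      rw [hdrop, ← hprelen, List.getD_append_right _ _ _ _ (by omega)]
      simp
    rw [hget, row_fill (v k) r (List.replicate r pvEmptySpace) (by simp), List.drop_replicate]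
    simp only [Nat.sub_self, List.replicate_zero, List.append_nil]
    rw [hdrop, ← hprelen, List.set_append_right _ _ (by omega), Nat.sub_self]
    rw [List.set_cons_zero, List.map_append, hprelen, ← hpre]
    simp

-- range(0, n) is List.range n with its elements cast to Int
lemma pyRange_natCast (n : Nat) : PySem.List.pyRange 0 (n : Int) 1
    = (List.range n).map (Nat.cast : Nat → Int) := by
  induction n with
  | zero => simp [PySem.List.pyRange_one_eq_nil]
  | succ n ih =>
    push_cast
    rw [PySem.List.pyRange_one_succ_right (by positivity), List.range_succ, List.map_append, ← ih]
    rfl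

-- ===== VERDICT (by name: the statement is the Claim_ definition above) =====
theorem rotateLevel_spec : Claim_equal_rotateLevel := by
  intro level _hdom hpre
  obtain ⟨hne, hall⟩ := hpre
  unfold Spec_rotateLevel rotateLevel rotateLevel_alt
  have hhd : level.headD ([] : List String) = level.head?.getD [] := by cases level <;> rfl
  have hhead : PySem.List.pyGetD level 0 [] = level.headD [] := by
    cases level with
    | nil => exact absurd rfl hne
    | cons a as => simp [PySem.List.pyGetD, PySem.List.pyGet?, PySem.List.pyIdx?]
  simp only [hhead]
  set r : Nat := level.length with hr
  set c : Nat := (level.headD []).length with hc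
  have hrpos : 0 < r := List.length_pos_of_ne_nil hne
  -- A side: normalise to the (range c).map form
  simp only [pyRange_natCast, List.foldl_map, pvSetIdx, Int.toNat_natCast]
  rw [foldl_append_const, foldl_append_const]
  rw [outer_loop c r (fun i j =>
        PySem.List.pyGetD (PySem.List.pyGetD level ((r : Int) - ((j : Int) + 1)) [])
          (i : Int) pvEmptySpace) c le_rfl]
  simp only [Nat.sub_self, List.replicate_zero, List.append_nil]
  -- B side: the fold invariant gives the column map
  have hcols0len : ((level.head?.getD []).map (fun _ => ([] : List String))).length = c := by
    rw [← hhd]; simp [hc]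
  rw [hhd, foldB_eq level _ (by rw [hcols0len]; exact hall), hcols0len, List.map_map]
  apply List.map_congr_left
  intro i hi
  rw [List.mem_range] at hi
  have hgetnil : ((level.head?.getD []).map (fun _ => ([] : List String))).getD i [] = [] := by
    rw [List.getD_eq_getElem _ _ (by rw [List.length_map, ← hhd, ← hc]; exact hi)]
    simp
  rw [Function.comp_apply, hgetnil, List.nil_append, PySem.List.slice?_none_none_neg_one,
    Option.getD_some, ← List.map_reverse]
  apply List.ext_getElem
  · simp [hr]
  · intro t ht1 ht2
    have ht : t < r := by simpa using ht1
    have hlen1 : r - 1 - t < level.length := by rw [← hr]; omega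
    simp only [List.getElem_map, List.getElem_range, List.getElem_reverse, ← hr]
    have hcast : (r : Int) - ((t : Int) + 1) = ((r - 1 - t : Nat) : Int) := by omega
    rw [hcast, PySem.List.pyGetD_natCast, PySem.List.pyGetD_natCast,
        List.getD_eq_getElem _ _ hlen1]
    have hlen2 : i < (level[r - 1 - t]'hlen1).length :=
      lt_of_lt_of_le hi (hall _ (List.getElem_mem _))
    rw [List.getD_eq_getElem _ _ hlen2, List.getD_eq_getElem _ _ hlen2]
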